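-- pv_equiv track=rewrite | github.com/Celiian/Rpg_v1 | Core/Functions.py | atribute_advantage
-- ===== SOURCE A (Python) =====
-- def atribute_advantage(atk_type, defense_type):
--     if defense_type == "neutral":
--         return 0
--     types = ["fire", "earth", "lightning", "water"]
--     for i in range(0, len(types)):
--         if atk_type == types[i]:
--             if i == len(types) - 1:
--                 i_next = types[0]
--             else:
--                 i_next = types[i + 1]
--             i_prev = types[i - 1]
--
--             if defense_type == i_prev:
--                 return -20
--             elif defense_type == i_next:
--                 return 20
--             else:
--                 return 0
-- ===== SOURCE B (Python) =====
-- _ADVANTAGE = {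
--     ("fire", "earth"): 20, ("earth", "lightning"): 20,
--     ("lightning", "water"): 20, ("water", "fire"): 20,
--     ("fire", "water"): -20, ("earth", "fire"): -20,
--     ("lightning", "earth"): -20, ("water", "lightning"): -20,
-- }
--
-- def atribute_advantage(atk_type, defense_type):
--     if defense_type == "neutral":
--         return 0
--     if atk_type not in ("fire", "earth", "lightning", "water"):
--         return None
--     return _ADVANTAGE.get((atk_type, defense_type), 0)
-- ===== Notes on version B (the rewrite author's own statement) =====
-- stated objective: idiomatic
-- what changed: Replaces A's positional scan over the cycle list with explicit prev/next neighbour computation by a single lookup in a precomputed (attacker, defender) -> score table; no list, no index arithmetic remains.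
-- outside the precondition, e.g. on atribute_advantage('ice', 'fire'): A returns None, B returns None
import Mathlib
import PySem

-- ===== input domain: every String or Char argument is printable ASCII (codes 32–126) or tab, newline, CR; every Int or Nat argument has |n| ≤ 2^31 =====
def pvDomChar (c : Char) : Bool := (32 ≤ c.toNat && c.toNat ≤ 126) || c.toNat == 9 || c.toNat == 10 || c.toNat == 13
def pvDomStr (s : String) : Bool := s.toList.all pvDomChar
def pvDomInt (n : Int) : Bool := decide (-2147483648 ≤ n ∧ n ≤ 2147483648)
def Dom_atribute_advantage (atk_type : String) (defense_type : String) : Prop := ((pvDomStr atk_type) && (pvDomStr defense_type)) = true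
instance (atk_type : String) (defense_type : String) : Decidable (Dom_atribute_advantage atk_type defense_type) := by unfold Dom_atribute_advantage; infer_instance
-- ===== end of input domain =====

-- B replaces A's positional scan over the cycle list (with prev/next neighbour comparisons)
-- by one lookup in a precomputed (attacker, defender) -> score table; objective: more idiomatic.

-- ===== PORT A =====
-- the loop body of A's 'for i in range(0, len(types))'; negative index types[i-1] wraps, exact via pyGet?
def aaLoop (atk_type : String) (defense_type : String) (types : List String) : List Int → Int
  | [] => 0  -- Python A falls through and returns None here; excluded by Pre_
  | i :: rest =>
    if atk_type == (PySem.List.pyGet? types i).getD "" then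
      let i_next := if i == (types.length : Int) - 1 then (PySem.List.pyGet? types 0).getD ""
                    else (PySem.List.pyGet? types (i + 1)).getD ""
      let i_prev := (PySem.List.pyGet? types (i - 1)).getD ""
      if defense_type == i_prev then -20
      else if defense_type == i_next then 20
      else 0
    else aaLoop atk_type defense_type types rest

def atribute_advantage (atk_type : String) (defense_type : String) : Int :=
  if defense_type == "neutral" then 0
  else
    let types : List String := ["fire", "earth", "lightning", "water"]
    aaLoop atk_type defense_type types (PySem.List.pyRange 0 (types.length : Int) 1)

-- ===== PORT B =====
-- the module-level _ADVANTAGE dict literal of Source B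
def aaTable : PySem.Dict (String × String) Int :=
  PySem.Dict.ofList
    [(("fire", "earth"), 20), (("earth", "lightning"), 20),
     (("lightning", "water"), 20), (("water", "fire"), 20),
     (("fire", "water"), -20), (("earth", "fire"), -20),
     (("lightning", "earth"), -20), (("water", "lightning"), -20)]

def atribute_advantage_alt (atk_type : String) (defense_type : String) : Int :=
  if defense_type == "neutral" then 0
  else if atk_type ∈ ["fire", "earth", "lightning", "water"] then
    aaTable.getD (atk_type, defense_type) 0
  else 0  -- Python B returns None here; excluded by Pre_

-- ===== PRECONDITION & SPEC =====
-- Pre_ excludes inputs where Python A falls off the loop and returns None (not an int):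
-- defense_type ≠ "neutral" with atk_type outside the four elemental types.
def Pre_atribute_advantage (atk_type : String) (defense_type : String) : Prop :=
  defense_type = "neutral" ∨ atk_type ∈ ["fire", "earth", "lightning", "water"]
instance (atk_type : String) (defense_type : String) : Decidable (Pre_atribute_advantage atk_type defense_type) := by unfold Pre_atribute_advantage; infer_instance

def pvWitness_atribute_advantage : String × String := ("fire", "water")

def Spec_atribute_advantage (atk_type : String) (defense_type : String) (out : Int) : Prop := out = atribute_advantage_alt atk_type defense_type
instance (atk_type : String) (defense_type : String) (out : Int) : Decidable (Spec_atribute_advantage atk_type defense_type out) := by unfold Spec_atribute_advantage; infer_instance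

-- ===== CLAIM (what is proved, stated in full; the proofs are below) =====
def Claim_equal_atribute_advantage : Prop := ∀ (atk_type : String) (defense_type : String), Dom_atribute_advantage atk_type defense_type → Pre_atribute_advantage atk_type defense_type → Spec_atribute_advantage atk_type defense_type (atribute_advantage atk_type defense_type)

-- ===== LEMMAS AND PROOFS =====

lemma pv_pair_beq (a b c d : String) : ((a, b) == (c, d)) = (a == c && b == d) := rfl

lemma pv_pr4 : PySem.List.pyRange 0 4 1 = [0, 1, 2, 3] := by decide

-- when defense_type is none of the five known strings, both sides return 0
lemma pv_zero_case (atk defense : String)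
    (ha : atk = "fire" ∨ atk = "earth" ∨ atk = "lightning" ∨ atk = "water")
    (h0 : (defense == "neutral") = false)
    (h1 : (defense == "fire") = false) (h1' : (("fire" : String) == defense) = false)
    (h2 : (defense == "earth") = false) (h2' : (("earth" : String) == defense) = false)
    (h3 : (defense == "lightning") = false) (h3' : (("lightning" : String) == defense) = false)
    (h4 : (defense == "water") = false) (h4' : (("water" : String) == defense) = false) :
    atribute_advantage atk defense = atribute_advantage_alt atk defense := by
  rcases ha with h | h | h | h <;> subst h <;>
    simp [atribute_advantage, atribute_advantage_alt, aaLoop, aaTable, pv_pr4,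
      PySem.List.pyGet?, PySem.List.pyIdx?, PySem.Dict.getD, PySem.Dict.get?, PySem.Dict.ofList, PySem.Dict.update,
      PySem.Dict.empty, PySem.Dict.insert, List.find?, pv_pair_beq,
      h0, h1, h1', h2, h2', h3, h3', h4, h4']

-- ===== VERDICT (by name: the statement is the Claim_ definition above) =====
theorem atribute_advantage_spec : Claim_equal_atribute_advantage := by
  intro atk defense _ hpre
  unfold Spec_atribute_advantage
  by_cases h0 : defense = "neutral"
  · subst h0; simp [atribute_advantage, atribute_advantage_alt]
  · have ha : atk = "fire" ∨ atk = "earth" ∨ atk = "lightning" ∨ atk = "water" := by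
      rcases hpre with h | h
      · exact absurd h h0
      · simpa using h
    by_cases h1 : defense = "fire"
    · subst h1; rcases ha with h | h | h | h <;> subst h <;> decide
    · by_cases h2 : defense = "earth"
      · subst h2; rcases ha with h | h | h | h <;> subst h <;> decide
      · by_cases h3 : defense = "lightning"
        · subst h3; rcases ha with h | h | h | h <;> subst h <;> decide
        · by_cases h4 : defense = "water"
          · subst h4; rcases ha with h | h | h | h <;> subst h <;> decide
          · exact pv_zero_case atk defense ha
              (beq_eq_false_iff_ne.mpr h0)
              (beq_eq_false_iff_ne.mpr h1) (beq_eq_false_iff_ne.mpr (Ne.symm h1))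
              (beq_eq_false_iff_ne.mpr h2) (beq_eq_false_iff_ne.mpr (Ne.symm h2))
              (beq_eq_false_iff_ne.mpr h3) (beq_eq_false_iff_ne.mpr (Ne.symm h3))
              (beq_eq_false_iff_ne.mpr h4) (beq_eq_false_iff_ne.mpr (Ne.symm h4))
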